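-- pv_equiv track=rewrite | github.com/lihuss/FilaGlyph | src/makevideo/subprocess.py | extract_error_output
-- ===== SOURCE A (Python) =====
-- def extract_error_output(text: str) -> str:
--     """Extract the error-dense portion from mixed stdout/stderr output.
--
--     On failure, many tools print progress logs before the actual exception stack.
--     This helper keeps the complete error chain while dropping noisy normal logs.
--     """
--     if not text:
--         return ""
--
--     markers = [
--         "Traceback (most recent call last):",
--         "+--------------------- Traceback",
--         "RuntimeError:",
--         "ValueError:",
--         "TypeError:",
--     ]
--     index = min((text.find(marker) for marker in markers if marker in text), default=-1)
--     if index >= 0: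
--         return text[index:]
--     return text
-- ===== SOURCE B (Python) =====
-- import re
--
-- _MARKERS = [
--     "Traceback (most recent call last):",
--     "+--------------------- Traceback",
--     "RuntimeError:",
--     "ValueError:",
--     "TypeError:",
-- ]
-- _MARKER_RE = re.compile("|".join(re.escape(m) for m in _MARKERS))
--
--
-- def extract_error_output(text: str) -> str:
--     """Extract the error-dense portion from mixed stdout/stderr output."""
--     if not text:
--         return ""
--     m = _MARKER_RE.search(text)
--     if m:
--         return text[m.start():]
--     return text
-- ===== Notes on version B (the rewrite author's own statement) =====
-- stated objective: idiomatic
-- what changed: Replaces the per-marker find/in scans plus min() with one precompiled alternation regex whose single leftmost search gives the cut position directly.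
import Mathlib
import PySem

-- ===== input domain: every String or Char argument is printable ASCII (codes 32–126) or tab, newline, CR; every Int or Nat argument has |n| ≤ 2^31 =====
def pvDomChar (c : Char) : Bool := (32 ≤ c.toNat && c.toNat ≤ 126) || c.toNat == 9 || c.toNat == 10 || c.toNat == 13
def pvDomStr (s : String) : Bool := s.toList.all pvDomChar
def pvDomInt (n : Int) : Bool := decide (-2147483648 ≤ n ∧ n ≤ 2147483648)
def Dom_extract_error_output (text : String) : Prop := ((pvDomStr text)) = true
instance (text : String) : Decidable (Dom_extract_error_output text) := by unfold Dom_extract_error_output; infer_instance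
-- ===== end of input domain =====

-- B replaces the per-marker find/in scans plus min() with one leftmost-match scan
-- (a precompiled alternation regex in Python); same return value, no side effects.

-- the five marker literals (A's local list; B's module-level _MARKERS — same literal)
def pvMarkers : List String :=
  ["Traceback (most recent call last):",
   "+--------------------- Traceback",
   "RuntimeError:",
   "ValueError:",
   "TypeError:",
   ]

-- ===== PORT A =====
def extract_error_output (text : String) : String :=
  if text.toList = [] then ""
  else
    let index := PySem.List.minD
      ((pvMarkers.filter (fun m => PySem.Str.isIn m text)).map
        (fun m => PySem.Str.find text m)) (fun x => x) (-1)
    if index ≥ 0 then PySem.Str.slice text (some index) none else text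

-- ===== PORT B =====
-- hand port of `_MARKER_RE.search(text)` for an alternation of escaped literals:
-- scan positions left to right, at each position try each literal as a prefix;
-- return the first (leftmost) matching position — exactly re.search's semantics here.
def pvScan (cs : List Char) : Option Nat :=
  match cs with
  | [] => none
  | _ :: rest =>
      if pvMarkers.any (fun m => m.toList.isPrefixOf cs) then some 0
      else (pvScan rest).map (· + 1)

def extract_error_output_alt (text : String) : String :=
  if text.toList = [] then ""
  else
    match pvScan text.toList with
    | some i => String.ofList (text.toList.drop i)
    | none => text

-- ===== PRECONDITION & SPEC =====
def Spec_extract_error_output (text : String) (out : String) : Prop := out = extract_error_output_alt text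
instance (text : String) (out : String) : Decidable (Spec_extract_error_output text out) := by unfold Spec_extract_error_output; infer_instance

-- ===== CLAIM (what is proved, stated in full; the proofs are below) =====
def Claim_equal_extract_error_output : Prop := ∀ (text : String), Dom_extract_error_output text → Spec_extract_error_output text (extract_error_output text)

-- ===== LEMMAS AND PROOFS =====

-- no marker is the empty string
lemma pvMarkers_ne_nil : ∀ m ∈ pvMarkers, m.toList ≠ [] := by decide

-- a match at position j, phrased on lists
def pvMatchAt (cs : List Char) (j : Nat) : Prop :=
  ∃ m ∈ pvMarkers, m.toList <+: cs.drop j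

lemma pvScan_correct (cs : List Char) :
    (pvScan cs = none → ∀ j, ¬ pvMatchAt cs j) ∧
    (∀ i, pvScan cs = some i → pvMatchAt cs i ∧ ∀ j < i, ¬ pvMatchAt cs j) := by
  induction cs with
  | nil =>
      refine ⟨fun _ j h => ?_, fun i hi => by simp [pvScan] at hi⟩
      obtain ⟨m, hm, hp⟩ := h
      simp at hp
      exact pvMarkers_ne_nil m hm (by simp [hp])
  | cons c rest ih =>
      by_cases hmatch : pvMarkers.any (fun m => m.toList.isPrefixOf (c :: rest)) = true
      · constructor
        · intro hnone; simp [pvScan, hmatch] at hnone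
        · intro i hi
          simp [pvScan, hmatch] at hi
          subst hi
          refine ⟨?_, by omega⟩
          simp only [List.any_eq_true] at hmatch
          obtain ⟨m, hm, hp⟩ := hmatch
          exact ⟨m, hm, by simpa using List.isPrefixOf_iff_prefix.mp hp⟩
      · have h0 : ¬ pvMatchAt (c :: rest) 0 := by
          intro ⟨m, hm, hp⟩
          exact hmatch (List.any_eq_true.mpr ⟨m, hm,
            List.isPrefixOf_iff_prefix.mpr (by simpa using hp)⟩)
        have hdrop : ∀ j : Nat, (c :: rest).drop (j + 1) = rest.drop j := fun j => rfl
        constructor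
        · intro hnone j
          simp [pvScan, hmatch] at hnone
          match j with
          | 0 => exact h0
          | j + 1 =>
              intro ⟨m, hm, hp⟩
              exact ih.1 hnone j ⟨m, hm, by rwa [hdrop] at hp⟩
        · intro i hi
          simp [pvScan, hmatch] at hi
          obtain ⟨i', hi', rfl⟩ := hi
          obtain ⟨h1, h2⟩ := ih.2 i' hi'
          refine ⟨⟨h1.choose, h1.choose_spec.1, by rw [hdrop]; exact h1.choose_spec.2⟩, ?_⟩
          intro j hj
          match j with
          | 0 => exact h0
          | j + 1 =>
              intro ⟨m, hm, hp⟩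
              exact h2 j (by omega) ⟨m, hm, by rwa [hdrop] at hp⟩

-- any match position shows the marker is a substring of the text
lemma pvMatch_isIn {text : String} {j : Nat} {m : String}
    (hm : m.toList <+: text.toList.drop j) : PySem.Str.isIn m text = true := by
  rw [PySem.Str.isIn_eq]
  exact (PySem.Chars.exists_prefix_drop_iff_isIn m.toList text.toList).mp ⟨j, hm⟩

-- ===== VERDICT (by name: the statement is the Claim_ definition above) =====
theorem extract_error_output_spec : Claim_equal_extract_error_output := by
  intro text _
  unfold Spec_extract_error_output extract_error_output extract_error_output_alt
  by_cases hnil : text.toList = []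
  · simp [hnil]
  · rw [if_neg hnil, if_neg hnil]
    set Lm := pvMarkers.filter (fun m => PySem.Str.isIn m text) with hLm
    set finds := Lm.map (fun m => PySem.Str.find text m) with hfinds
    rcases hmin : PySem.List.min? finds (fun x => x) with _ | v
    · -- no marker occurs in text: min? is none, so Lm = [], A keeps text
      have hLme : Lm = [] := by
        have := (PySem.List.min?_eq_none_iff finds (fun x => x)).mp hmin
        simpa [hfinds] using this
      have hscan : pvScan text.toList = none := by
        rcases hs : pvScan text.toList with _ | i
        · rfl
        · obtain ⟨⟨m, hm, hp⟩, _⟩ := (pvScan_correct text.toList).2 i hs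
          have : m ∈ Lm := List.mem_filter.mpr ⟨hm, pvMatch_isIn hp⟩
          rw [hLme] at this; exact absurd this (List.not_mem_nil)
      simp [PySem.List.minD, hmin, hscan]
    · -- some marker occurs: min of the finds is the leftmost scan position
      have hvmem := PySem.List.min?_mem hmin
      have hvmin := PySem.List.min?_isMin hmin
      obtain ⟨m0, hm0L, hv⟩ := List.mem_map.mp hvmem
      obtain ⟨hm0, hIn0⟩ := List.mem_filter.mp hm0L
      have hv0 : 0 ≤ v := by
        rw [← hv]
        exact (PySem.Str.find_nonneg_iff text m0).mpr
          ((PySem.Str.isIn_iff_infix m0 text).mp hIn0)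
      have hfind0 : 0 ≤ PySem.Chars.find text.toList m0.toList := by
        rw [← PySem.Str.find_eq, hv]; exact hv0
      obtain ⟨hpre0, _⟩ := PySem.Chars.find_spec hfind0
      have hmatchv : pvMatchAt text.toList v.toNat :=
        ⟨m0, hm0, by rwa [← PySem.Str.find_eq, hv] at hpre0⟩
      rcases hs : pvScan text.toList with _ | i
      · exact absurd hmatchv ((pvScan_correct text.toList).1 hs v.toNat)
      · obtain ⟨⟨m1, hm1, hp1⟩, hleast⟩ := (pvScan_correct text.toList).2 i hs
        -- i ≤ v.toNat
        have hile : i ≤ v.toNat := by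
          by_contra h
          exact hleast v.toNat (by omega) hmatchv
        -- v ≤ i
        have hvle : v ≤ (i : Int) := by
          have hIn1 : PySem.Str.isIn m1 text = true := pvMatch_isIn hp1
          have hmem1 : PySem.Str.find text m1 ∈ finds :=
            List.mem_map.mpr ⟨m1, List.mem_filter.mpr ⟨hm1, hIn1⟩, rfl⟩
          have h1 := hvmin _ hmem1
          have hf1 : 0 ≤ PySem.Chars.find text.toList m1.toList := by
            rw [← PySem.Str.find_eq]
            exact (PySem.Str.find_nonneg_iff text m1).mpr
              ((PySem.Str.isIn_iff_infix m1 text).mp hIn1)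
          obtain ⟨_, hmin1⟩ := PySem.Chars.find_spec hf1
          have : (PySem.Chars.find text.toList m1.toList).toNat ≤ i := by
            by_contra h
            exact hmin1 i (by omega) hp1
          have := PySem.Str.find_eq text m1
          omega
        have hiv : i = v.toNat := by omega
        have hvge : v ≥ 0 := hv0
        rw [PySem.List.minD, hmin, Option.getD_some, if_pos hvge]
        subst hiv
        apply String.toList_inj.mp
        simp [PySem.Str.slice, PySem.Chars.slice_eq_listSlice,
          PySem.List.slice_from _ hv0, String.ofList]
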